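-- pv_equiv track=rewrite | github.com/robertmacyiii/pytorch-a2c-ppo | scripts/log.py | labels_from_switches
-- ===== SOURCE A (Python) =====
-- def labels_from_switches(switches):
--     start_index = 0
--     index = 0
--     labels = []
--     while index < len(switches):
--         if switches[index] != 0:
--             for option_index in range(start_index, index + 1):
--                 labels.append(switches[index] - 1)
--             index += 1
--             start_index = index
--         else:
--             index += 1
--     return labels
-- ===== SOURCE B (Python) =====
-- def labels_from_switches(switches):
--     labels = []
--     cur = None
--     for s in reversed(switches):
--         if s != 0:
--             cur = s - 1
--         if cur is not None:
--             labels.append(cur)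
--     labels.reverse()
--     return labels
-- ===== Notes on version B (the rewrite author's own statement) =====
-- stated objective: alternative
-- what changed: Instead of A's forward scan that, at each nonzero marker, emits a block covering the positions since the previous marker, B walks the list BACKWARD once, propagating the label of the nearest marker to the right (cur) and labelling each position as it is visited (skipping positions past the last marker), then reverses the result.
import Mathlib
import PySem

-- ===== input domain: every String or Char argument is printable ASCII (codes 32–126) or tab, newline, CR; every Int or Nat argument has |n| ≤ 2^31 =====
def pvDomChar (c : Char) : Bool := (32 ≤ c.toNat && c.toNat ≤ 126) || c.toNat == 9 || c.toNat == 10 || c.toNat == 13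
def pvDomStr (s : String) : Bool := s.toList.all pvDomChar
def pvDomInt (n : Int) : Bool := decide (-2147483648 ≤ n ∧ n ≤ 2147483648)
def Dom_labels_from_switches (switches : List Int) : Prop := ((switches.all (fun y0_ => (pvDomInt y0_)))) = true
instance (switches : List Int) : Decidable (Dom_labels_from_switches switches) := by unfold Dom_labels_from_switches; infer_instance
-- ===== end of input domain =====

-- B replaces A's forward scan (emit a block at each marker covering the gap since the
-- previous marker) by a single backward pass propagating the nearest marker to the right
-- and labelling each position on the way, then reversing (alternative traversal order).


-- ===== PORT A =====
-- while loop of A: state (start_index, index, labels); the inner for-loop over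
-- range(start_index, index+1) is a foldl over PySem.List.pyRange appending switches[index]-1.
def labelsGoA (switches : List Int) (start_index index : Nat) (labels : List Int) : List Int :=
  if h : index < switches.length then
    if switches[index] ≠ 0 then
      labelsGoA switches (index + 1) (index + 1)
        ((PySem.List.pyRange (start_index : Int) ((index : Int) + 1) 1).foldl
          (fun acc _ => acc ++ [switches[index] - 1]) labels)
    else
      labelsGoA switches start_index (index + 1) labels
  else labels
termination_by switches.length - index

def labels_from_switches (switches : List Int) : List Int :=
  labelsGoA switches 0 0 []

-- ===== PORT B =====
-- for s in reversed(switches): if s != 0: cur = s - 1; if cur is not None: labels.append(cur);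
-- then labels.reverse().  State of the loop: (labels, cur : Option Int).
def labels_from_switches_alt (switches : List Int) : List Int :=
  (switches.reverse.foldl
    (fun (st : List Int × Option Int) (s : Int) =>
      let cur := if s ≠ 0 then some (s - 1) else st.2
      (match cur with | some c => st.1 ++ [c] | none => st.1, cur))
    ([], none)).1.reverse

-- ===== PRECONDITION & SPEC =====
def Spec_labels_from_switches (switches : List Int) (out : List Int) : Prop := out = labels_from_switches_alt switches
instance (switches : List Int) (out : List Int) : Decidable (Spec_labels_from_switches switches out) := by unfold Spec_labels_from_switches; infer_instance

-- ===== CLAIM (what is proved, stated in full; the proofs are below) =====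
def Claim_equal_labels_from_switches : Prop := ∀ (switches : List Int), Dom_labels_from_switches switches → Spec_labels_from_switches switches (labels_from_switches switches)

-- ===== LEMMAS AND PROOFS =====

-- reference for A: forward pass, k = number of pending (unlabelled) positions including current.
def pRef : List Int → Nat → List Int
  | [], _ => []
  | v :: rest, k => if v ≠ 0 then List.replicate k (v - 1) ++ pRef rest 1 else pRef rest (k + 1)

-- reference for B: structural right-to-left pass; second component = label of the
-- leftmost nonzero entry (none if all zero).
def bRef : List Int → List Int × Option Int
  | [] => ([], none)
  | v :: rest =>
    let p := bRef rest
    let cur := if v ≠ 0 then some (v - 1) else p.2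
    (match cur with | some c => c :: p.1 | none => p.1, cur)

-- all-zero suffix: no labels at all.
theorem pRef_none : ∀ (l : List Int), (bRef l).2 = none → ∀ k, pRef l k = [] := by
  intro l
  induction l with
  | nil => intro _ k; rfl
  | cons v rest ih =>
    intro h k
    by_cases hv : v = 0
    · subst hv
      simp only [bRef] at h
      simp only [if_neg (by simp : ¬((0:Int) ≠ 0))] at h
      simp [pRef, ih h]
    · simp [bRef, hv] at h

-- shifting the pending counter prepends copies of the leftmost label.
theorem pRef_shift : ∀ (l : List Int) (c : Int), (bRef l).2 = some c →
    ∀ k, pRef l (k + 1) = List.replicate k c ++ pRef l 1 := by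
  intro l
  induction l with
  | nil => intro c h; simp [bRef] at h
  | cons v rest ih =>
    intro c h k
    by_cases hv : v = 0
    · subst hv
      simp only [bRef] at h
      simp only [if_neg (by simp : ¬((0:Int) ≠ 0))] at h
      show pRef rest (k + 1 + 1) = List.replicate k c ++ pRef rest (1 + 1)
      rw [ih c h (k + 1), ih c h 1, List.replicate_succ', List.append_assoc]
      simp [List.replicate_one]
    · have hc : c = v - 1 := by
        simp only [bRef, if_pos hv] at h
        exact (Option.some.injEq _ _ ▸ h).symm
      subst hc
      simp only [pRef, if_pos hv]
      rw [List.replicate_succ', List.append_assoc]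
      simp [List.replicate_one]

-- forward reference agrees with the backward one at counter 1.
theorem pRef_one : ∀ (l : List Int), pRef l 1 = (bRef l).1 := by
  intro l
  induction l with
  | nil => rfl
  | cons v rest ih =>
    by_cases hv : v = 0
    · subst hv
      show pRef rest (1 + 1) = _
      rcases hb : (bRef rest).2 with _ | c
      · rw [pRef_none rest hb]
        simp [bRef, hb, ← ih, pRef_none rest hb]
      · rw [pRef_shift rest c hb 1]
        simp [bRef, hb, ih, List.replicate_one]
    · simp [pRef, bRef, hv, ih, List.replicate_one]

-- B's fold over the reversed list computes bRef (with reversed accumulator).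
theorem altFold_eq_bRef (l : List Int) :
    l.reverse.foldl
      (fun (st : List Int × Option Int) (s : Int) =>
        let cur := if s ≠ 0 then some (s - 1) else st.2
        (match cur with | some c => st.1 ++ [c] | none => st.1, cur))
      ([], none) = ((bRef l).1.reverse, (bRef l).2) := by
  rw [List.foldl_reverse]
  induction l with
  | nil => simp [bRef]
  | cons v rest ih =>
    simp only [List.foldr_cons, ih, bRef]
    by_cases hv : v = 0
    · simp only [if_neg (by simp [hv] : ¬(v ≠ 0))]
      rcases hb : (bRef rest).2 with _ | c <;> simp
    · simp [if_pos hv]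

theorem alt_eq_pRef (l : List Int) : labels_from_switches_alt l = pRef l 1 := by
  unfold labels_from_switches_alt
  rw [altFold_eq_bRef, pRef_one l]
  simp

-- A's loop in terms of the forward reference.
theorem goA_eq_pRef (rest : List Int) :
    ∀ (switches : List Int) (s index : Nat) (labels : List Int),
    switches.drop index = rest → s ≤ index →
    labelsGoA switches s index labels = labels ++ pRef rest (index + 1 - s) := by
  induction rest with
  | nil =>
    intro switches s index labels hdrop _
    have hlen : switches.length ≤ index := by simpa using List.drop_eq_nil_iff.mp hdrop
    rw [labelsGoA]
    simp [pRef, Nat.not_lt.mpr hlen]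
  | cons v rest ih =>
    intro switches s index labels hdrop hs
    have hlt : index < switches.length := by
      by_contra h
      rw [List.drop_eq_nil_iff.mpr (Nat.not_lt.mp h)] at hdrop
      simp at hdrop
    have hcons := List.drop_eq_getElem_cons hlt
    rw [hcons] at hdrop
    have hv : switches[index] = v := (List.cons.injEq _ _ _ _ ▸ hdrop).1
    have hdrop' : switches.drop (index + 1) = rest := (List.cons.injEq _ _ _ _ ▸ hdrop).2
    rw [labelsGoA]
    simp only [hlt, dif_pos, hv]
    by_cases hvz : v = 0
    · rw [if_neg (by simp [hvz])]
      rw [ih switches s (index + 1) labels hdrop' (Nat.le_succ_of_le hs)]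
      have : index + 1 + 1 - s = (index + 1 - s) + 1 := by omega
      simp [pRef, hvz, this]
    · rw [if_pos hvz]
      rw [ih switches (index + 1) (index + 1) _ hdrop' (Nat.le_refl _)]
      rw [PySem.List.foldl_append_singleton_eq_map]
      have hlenr : (PySem.List.pyRange (s : Int) ((index : Int) + 1) 1).length
          = index + 1 - s := by
        rw [PySem.List.length_pyRange_one]; omega
      rw [List.map_const', hlenr]
      simp [pRef, hvz, List.append_assoc]

-- ===== VERDICT (by name: the statement is the Claim_ definition above) =====
theorem labels_from_switches_spec : Claim_equal_labels_from_switches := by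
  intro switches _
  unfold Spec_labels_from_switches labels_from_switches
  rw [goA_eq_pRef switches switches 0 0 [] (by simp) (Nat.le_refl 0), alt_eq_pRef]
  simp
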